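-- pv_equiv track=rewrite | github.com/skavy359/Algorithmic-Huddle | Leetcode-Problems/First Letter Capitalization II.py | smart_capitalize
-- ===== SOURCE A (Python) =====
-- def smart_capitalize(text: str) -> str:
--     words = text.split(" ")
--     result = []
--     for word in words:
--         if "-" in word:
--             parts = word.split("-")
--             parts = [p.capitalize() for p in parts]
--             result.append("-".join(parts))
--         else:
--             result.append(word.capitalize())
--     return " ".join(result)
-- ===== SOURCE B (Python) =====
-- def smart_capitalize(text: str) -> str:
--     # Single left-to-right character scan with a "start of word/part" flag,
--     # instead of A's nested split/capitalize/join passes.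
--     out = []
--     start = True
--     for ch in text:
--         if ch == ' ' or ch == '-':
--             out.append(ch)
--             start = True
--         elif start:
--             out.append(ch.upper())
--             start = False
--         else:
--             out.append(ch.lower())
--     return ''.join(out)
-- ===== Notes on version B (the rewrite author's own statement) =====
-- stated objective: simpler
-- what changed: Replaces A's nested split-on-space / split-on-hyphen, per-part capitalize and two-level join with a single left-to-right character scan that keeps a start-of-word flag and upper/lowercases each character in place.
import Mathlib
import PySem

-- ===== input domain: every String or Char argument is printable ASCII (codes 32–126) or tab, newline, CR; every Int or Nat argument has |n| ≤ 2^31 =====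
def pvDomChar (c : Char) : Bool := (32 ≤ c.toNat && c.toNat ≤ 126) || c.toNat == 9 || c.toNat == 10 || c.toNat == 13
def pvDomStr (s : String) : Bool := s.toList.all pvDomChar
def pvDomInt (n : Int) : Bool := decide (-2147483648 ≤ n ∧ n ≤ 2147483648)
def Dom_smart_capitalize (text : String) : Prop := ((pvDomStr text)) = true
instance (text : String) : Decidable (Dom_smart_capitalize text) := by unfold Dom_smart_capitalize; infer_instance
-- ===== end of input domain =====

-- B replaces A's nested split/capitalize/join passes by one left-to-right character
-- scan with a start-of-word flag (objective: simpler single pass, same result).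

-- ===== PORT A =====
-- hand port of str.capitalize: first char title-cased, rest lowered
-- (exact on the ASCII domain, where titlecase = uppercase and stays one char)
def pyCapitalize (w : List Char) : List Char :=
  match w with
  | [] => []
  | c :: cs => PySem.Chars.upperChar c :: PySem.Chars.lower cs

def smart_capitalize (text : String) : String :=
  let words := PySem.Chars.splitOn text.toList [' ']
  let result := words.foldl (fun (result : List (List Char)) word =>
    if PySem.Chars.isIn ['-'] word then
      let parts := PySem.Chars.splitOn word ['-']
      let parts := parts.map pyCapitalize
      result ++ [PySem.Chars.join ['-'] parts]
    else
      result ++ [pyCapitalize word]) []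
  String.ofList (PySem.Chars.join [' '] result)

-- ===== PORT B =====
def smart_capitalize_alt (text : String) : String :=
  let st := text.toList.foldl (fun (st : List Char × Bool) ch =>
    if ch = ' ' || ch = '-' then (st.1 ++ [ch], true)
    else if st.2 then (st.1 ++ PySem.Chars.upper [ch], false)
    else (st.1 ++ PySem.Chars.lower [ch], false)) ([], true)
  String.ofList st.1

-- ===== PRECONDITION & SPEC =====
def Spec_smart_capitalize (text : String) (out : String) : Prop := out = smart_capitalize_alt text
instance (text : String) (out : String) : Decidable (Spec_smart_capitalize text out) := by unfold Spec_smart_capitalize; infer_instance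

-- ===== CLAIM (what is proved, stated in full; the proofs are below) =====
def Claim_equal_smart_capitalize : Prop := ∀ (text : String), Dom_smart_capitalize text → Spec_smart_capitalize text (smart_capitalize text)

-- ===== LEMMAS AND PROOFS =====

-- simple structural recursion computing split on a single character
def splitCh (d : Char) : List Char → List (List Char)
  | [] => [[]]
  | c :: cs =>
    if c = d then [] :: splitCh d cs
    else match splitCh d cs with
      | [] => [[c]]
      | p :: ps => (c :: p) :: ps

def consFst (x : List Char) : List (List Char) → List (List Char)
  | [] => [x]
  | p :: ps => (x ++ p) :: ps

lemma splitCh_ne_nil (d : Char) (l : List Char) : splitCh d l ≠ [] := by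
  cases l with
  | nil => simp [splitCh]
  | cons c cs =>
    simp only [splitCh]
    split_ifs
    · simp
    · cases h : splitCh d cs <;> simp

lemma go_spec (d : Char) : ∀ (fuel : Nat) (l cur acc : _), l.length < fuel →
    PySem.Chars.splitOn.go [d] fuel l cur acc = acc.reverse ++ consFst cur.reverse (splitCh d l) := by
  intro fuel
  induction fuel with
  | zero => intro l cur acc h; omega
  | succ f ih =>
    intro l cur acc h
    cases l with
    | nil =>
      simp [PySem.Chars.splitOn.go, splitCh, consFst]
    | cons c rest =>
      rw [PySem.Chars.splitOn.go]
      by_cases hc : c = d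
      · have hp : List.isPrefixOf [d] (c :: rest) = true := by simp [List.isPrefixOf, hc]
        rw [if_pos hp]
        rw [ih _ _ _ (by simp at h ⊢; omega)]
        have hne := splitCh_ne_nil d rest
        cases hs : splitCh d rest with
        | nil => exact absurd hs hne
        | cons p ps => simp [splitCh, hc, hs, consFst]
      · have hp : List.isPrefixOf [d] (c :: rest) = false := by
          simp [List.isPrefixOf]; exact fun hdc => absurd hdc.symm hc
        rw [if_neg (by simp [hp])]
        rw [ih _ _ _ (by simp at h ⊢; omega)]
        cases hs : splitCh d rest with
        | nil => exact absurd hs (splitCh_ne_nil d rest)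
        | cons p ps => simp [splitCh, hc, hs, consFst]

lemma splitOn_single (d : Char) (l : List Char) :
    PySem.Chars.splitOn l [d] = splitCh d l := by
  rw [PySem.Chars.splitOn, go_spec d (l.length + 1) l [] [] (by omega)]
  cases hs : splitCh d l with
  | nil => exact absurd hs (splitCh_ne_nil d l)
  | cons p ps => simp [consFst]

-- the hyphen-level capitalizer: scan a word, capitalizing after each '-'
def capHyph : Bool → List Char → List Char
  | _, [] => []
  | start, c :: cs =>
    if c = '-' then '-' :: capHyph true cs
    else (if start then PySem.Chars.upperChar c else PySem.Chars.lowerChar c) :: capHyph false cs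

def capTail : List (List Char) → List Char
  | [] => []
  | p :: ps => '-' :: (pyCapitalize p ++ capTail ps)

def jc : List (List Char) → List Char
  | [] => []
  | p :: ps => pyCapitalize p ++ capTail ps

def jl : List (List Char) → List Char
  | [] => []
  | p :: ps => PySem.Chars.lower p ++ capTail ps

lemma join_map_cap (p : List Char) (ps : List (List Char)) :
    PySem.Chars.join ['-'] ((p :: ps).map pyCapitalize) = pyCapitalize p ++ capTail ps := by
  induction ps generalizing p with
  | nil => simp [PySem.Chars.join_singleton, capTail]
  | cons q qs ih =>
    simp only [List.map_cons] at ih ⊢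
    rw [PySem.Chars.join_cons_cons, ih q, capTail]
    simp

lemma hyph_main (cs : List Char) :
    jc (splitCh '-' cs) = capHyph true cs ∧ jl (splitCh '-' cs) = capHyph false cs := by
  induction cs with
  | nil => simp [splitCh, jc, jl, capHyph, pyCapitalize, PySem.Chars.lower, capTail]
  | cons c cs ih =>
    obtain ⟨ih1, ih2⟩ := ih
    by_cases hc : c = '-'
    · subst hc
      cases hs : splitCh '-' cs with
      | nil => exact absurd hs (splitCh_ne_nil _ cs)
      | cons p ps =>
        rw [hs] at ih1 ih2
        constructor <;>
          simp [splitCh, hs, jc, jl, capHyph, pyCapitalize, PySem.Chars.lower, capTail, ← ih1]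
    · cases hs : splitCh '-' cs with
      | nil => exact absurd hs (splitCh_ne_nil _ cs)
      | cons p ps =>
        rw [hs] at ih1 ih2
        constructor <;>
          simp [splitCh, hs, hc, jc, jl, capHyph, pyCapitalize, PySem.Chars.lower, ← ih2]

lemma singleton_infix_iff (d : Char) (w : List Char) : [d] <:+: w ↔ d ∈ w := by
  constructor
  · intro h; exact h.sublist.subset (by simp)
  · intro h
    obtain ⟨s, t, rfl⟩ := List.append_of_mem h
    exact ⟨s, t, by simp⟩

lemma capHyph_no_hyphen (w : List Char) (h : '-' ∉ w) :
    capHyph true w = pyCapitalize w ∧ capHyph false w = PySem.Chars.lower w := by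
  induction w with
  | nil => simp [capHyph, pyCapitalize, PySem.Chars.lower]
  | cons c cs ih =>
    simp only [List.mem_cons, not_or] at h
    obtain ⟨ih1, ih2⟩ := ih h.2
    have hc : c ≠ '-' := fun e => h.1 e.symm
    refine ⟨?_, ?_⟩ <;>
      simp [capHyph, hc, ih2, pyCapitalize, PySem.Chars.lower]

-- A's per-word branch collapses to capHyph true
lemma word_branch (w : List Char) :
    (if PySem.Chars.isIn ['-'] w then
        PySem.Chars.join ['-'] ((splitCh '-' w).map pyCapitalize)
      else pyCapitalize w) = capHyph true w := by
  by_cases hin : PySem.Chars.isIn ['-'] w = true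
  · rw [if_pos hin]
    cases hs : splitCh '-' w with
    | nil => exact absurd hs (splitCh_ne_nil _ w)
    | cons p ps =>
      rw [join_map_cap]
      have := (hyph_main w).1
      rw [hs] at this
      exact this
  · rw [if_neg hin]
    have hmem : '-' ∉ w := by
      intro hm
      exact hin ((PySem.Chars.isIn_iff_infix _ _).mpr ((singleton_infix_iff _ _).mpr hm))
    exact ((capHyph_no_hyphen w hmem).1).symm

-- the full scanner (B's state machine, without the accumulator)
def go2 : Bool → List Char → List Char
  | _, [] => []
  | start, c :: cs =>
    if c = ' ' || c = '-' then c :: go2 true cs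
    else (if start then PySem.Chars.upperChar c else PySem.Chars.lowerChar c) :: go2 false cs

def hTail : List (List Char) → List Char
  | [] => []
  | p :: ps => ' ' :: (capHyph true p ++ hTail ps)

def jh : List (List Char) → List Char
  | [] => []
  | p :: ps => capHyph true p ++ hTail ps

def jhf : List (List Char) → List Char
  | [] => []
  | p :: ps => capHyph false p ++ hTail ps

lemma join_map_h (p : List Char) (ps : List (List Char)) :
    PySem.Chars.join [' '] ((p :: ps).map (capHyph true)) = capHyph true p ++ hTail ps := by
  induction ps generalizing p with
  | nil => rw [List.map_cons, List.map_nil, PySem.Chars.join_singleton, show hTail [] = [] from rfl, List.append_nil]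
  | cons q qs ih =>
    simp only [List.map_cons] at ih ⊢
    rw [PySem.Chars.join_cons_cons, ih q, hTail]
    simp

lemma space_main (cs : List Char) :
    jh (splitCh ' ' cs) = go2 true cs ∧ jhf (splitCh ' ' cs) = go2 false cs := by
  induction cs with
  | nil => simp [splitCh, jh, jhf, capHyph, go2, hTail]
  | cons c cs ih =>
    obtain ⟨ih1, ih2⟩ := ih
    cases hs : splitCh ' ' cs with
    | nil => exact absurd hs (splitCh_ne_nil _ cs)
    | cons p ps =>
      rw [hs] at ih1 ih2
      by_cases hsp : c = ' '
      · subst hsp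
        constructor <;> simp [splitCh, hs, jh, jhf, capHyph, go2, hTail, ← ih1]
      · by_cases hhy : c = '-'
        · subst hhy
          constructor <;> simp [splitCh, hs, hsp, jh, jhf, capHyph, go2, ← ih1]
        · constructor <;> simp [splitCh, hs, hsp, hhy, jh, jhf, capHyph, go2, ← ih2]

-- A's foldl-with-append loop is a map
lemma foldl_A (cond : List Char → Bool) (g h : List Char → List Char) (ws : List (List Char)) :
    ∀ acc : List (List Char),
      ws.foldl (fun r w => if cond w then r ++ [g w] else r ++ [h w]) acc
        = acc ++ ws.map (fun w => if cond w then g w else h w) := by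
  induction ws with
  | nil => simp
  | cons w ws ih =>
    intro acc
    rw [List.foldl_cons, List.map_cons]
    by_cases hw : cond w = true <;> simp [hw, ih]

-- B's foldl with accumulator computes go2
lemma foldl_scan (l : List Char) : ∀ (acc : List Char) (start : Bool),
    (l.foldl (fun (st : List Char × Bool) ch =>
      if ch = ' ' || ch = '-' then (st.1 ++ [ch], true)
      else if st.2 then (st.1 ++ PySem.Chars.upper [ch], false)
      else (st.1 ++ PySem.Chars.lower [ch], false)) (acc, start)).1 = acc ++ go2 start l := by
  induction l with
  | nil => intro acc start; simp [go2]
  | cons c cs ih =>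
    intro acc start
    by_cases hc : (c = ' ' || c = '-') = true
    · rw [List.foldl_cons, if_pos hc, ih]
      simp [go2, hc]
    · simp only [Bool.not_eq_true] at hc
      cases start with
      | true =>
        rw [List.foldl_cons, if_neg (by simp [hc]), if_pos rfl, ih]
        simp [go2, hc, PySem.Chars.upper]
      | false =>
        rw [List.foldl_cons, if_neg (by simp [hc]), if_neg (by simp), ih]
        simp [go2, hc, PySem.Chars.lower]

lemma main_eq (text : String) : smart_capitalize text = smart_capitalize_alt text := by
  simp only [smart_capitalize, smart_capitalize_alt, foldl_A, List.nil_append, foldl_scan,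
    splitOn_single]
  congr 1
  have hmap : (splitCh ' ' text.toList).map
      (fun word => if PySem.Chars.isIn ['-'] word then
          PySem.Chars.join ['-'] ((splitCh '-' word).map pyCapitalize)
        else pyCapitalize word)
      = (splitCh ' ' text.toList).map (capHyph true) :=
    List.map_congr_left (fun w _ => word_branch w)
  rw [hmap]
  cases hs : splitCh ' ' text.toList with
  | nil => exact absurd hs (splitCh_ne_nil _ _)
  | cons p ps =>
    rw [join_map_h]
    have := (space_main text.toList).1
    rw [hs] at this
    exact this

-- ===== VERDICT (by name: the statement is the Claim_ definition above) =====
theorem smart_capitalize_spec : Claim_equal_smart_capitalize := by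
  intro text _
  unfold Spec_smart_capitalize
  exact main_eq text
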